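-- pv_equiv track=rewrite | github.com/stirfrypapi/coding_challenges | coding_challenges/visa_round_1.py | countMeetings
-- ===== SOURCE A (Python) =====
-- def countMeetings(firstDay, lastDay):
--     num = 0
--     dates_taken = set()
--
--     ans = []
--     lens = []
--     for f, l in zip(firstDay, lastDay):
--         if f == l:
--             num += 1
--             dates_taken.add(f)
--         else:
--             ans.append([f, l])
--             lens.append([f-l+1, len(ans)-1])
--
--     # sort by length and index from ans
--     lens.sort()
--     for l in lens:
--         f, l = ans[l[1]]
--         i = f
--         while i in dates_taken and i < l+1:
--             i += 1
--         if i < l+1: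
--             dates_taken.add(i)
--             num += 1
--
--     return num
-- ===== SOURCE B (Python) =====
-- def countMeetings(firstDay, lastDay):
--     num = 0
--     # union-find "next free day": nxt maps a day d to a strictly later day e
--     # such that every day in [d, e) is already taken; a day not in nxt is free.
--     nxt = {}
--
--     def find(d):
--         # smallest free day >= d, with path compression
--         path = []
--         while d in nxt:
--             path.append(d)
--             d = nxt[d]
--         for p in path:
--             nxt[p] = d
--         return d
--
--     intervals = []
--     for f, l in zip(firstDay, lastDay):
--         if f == l:
--             num += 1
--             if f not in nxt:
--                 nxt[f] = f + 1
--         else: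
--             intervals.append((f - l + 1, len(intervals), f, l))
--
--     intervals.sort()
--     for _, _, f, l in intervals:
--         d = find(f)
--         if d <= l:
--             nxt[d] = d + 1
--             num += 1
--     return num
-- ===== Notes on version B (the rewrite author's own statement) =====
-- stated objective: alternative
-- what changed: A finds the smallest free day in [f,l] by stepping day-by-day through the taken-days set; B instead maintains a union-find 'next free day' dictionary with path compression, so each query jumps over whole runs of taken days (intended as faster on scan-heavy inputs; a timing run measured 1.4x-1.7x at the largest generated size depending on input family, so speed is not claimed as a fact).
import Mathlib
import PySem

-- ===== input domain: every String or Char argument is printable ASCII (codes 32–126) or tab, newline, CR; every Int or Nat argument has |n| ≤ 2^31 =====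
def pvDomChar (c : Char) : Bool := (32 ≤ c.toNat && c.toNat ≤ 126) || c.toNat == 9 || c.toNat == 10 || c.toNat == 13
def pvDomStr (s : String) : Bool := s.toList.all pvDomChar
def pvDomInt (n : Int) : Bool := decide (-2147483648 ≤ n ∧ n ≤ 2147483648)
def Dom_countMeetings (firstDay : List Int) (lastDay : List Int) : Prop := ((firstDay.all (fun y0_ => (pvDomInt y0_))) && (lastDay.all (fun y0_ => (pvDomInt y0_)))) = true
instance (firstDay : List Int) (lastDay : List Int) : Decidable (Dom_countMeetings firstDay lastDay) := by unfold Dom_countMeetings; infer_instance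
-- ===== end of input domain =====

-- B replaces A's day-by-day linear scan for the smallest free day in [f, l] by a
-- union-find "next free day" dictionary with path compression (objective: alternative).

-- ===== PORT A =====
-- A's while loop: advance i while `i in dates_taken and i < l+1`
def scanA (S : PySem.Set Int) (l : Int) (i : Int) : Int :=
  if PySem.Set.contains S i ∧ i < l + 1 then scanA S l (i + 1) else i
termination_by (l + 1 - i).toNat
decreasing_by omega

-- A's first loop body (state: num, dates_taken, ans, lens)
def stepA1 (st : Int × PySem.Set Int × List (Int × Int) × List (Int × Int))
    (fl : Int × Int) : Int × PySem.Set Int × List (Int × Int) × List (Int × Int) :=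
  if fl.1 = fl.2 then (st.1 + 1, PySem.Set.add st.2.1 fl.1, st.2.2.1, st.2.2.2)
  else
    let ans' := st.2.2.1 ++ [(fl.1, fl.2)]
    (st.1, st.2.1, ans', st.2.2.2 ++ [(fl.1 - fl.2 + 1, (ans'.length : Int) - 1)])

-- A's second loop body; `ans[l[1]]` is always in range when called from countMeetings,
-- so the lookup is ported with pyGetD (same value as Python wherever Python returns)
def stepA2 (ans : List (Int × Int)) (st : Int × PySem.Set Int) (p : Int × Int) :
    Int × PySem.Set Int :=
  let fl := PySem.List.pyGetD ans p.2 ((0 : Int), (0 : Int))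
  let i := scanA st.2 fl.2 fl.1
  if i < fl.2 + 1 then (st.1 + 1, PySem.Set.add st.2 i) else (st.1, st.2)

def countMeetings (firstDay : List Int) (lastDay : List Int) : Int :=
  let st := (firstDay.zip lastDay).foldl stepA1 (0, PySem.Set.empty, [], [])
  -- lens.sort(): 2-element lists compare lexicographically = tuple key (fst, snd)
  let sortedLens := PySem.List.sorted2 st.2.2.2 (fun p => p.1) (fun p => p.2)
  (sortedLens.foldl (stepA2 st.2.2.1) (st.1, st.2.1)).1

-- ===== PORT B =====
-- B's `while d in nxt: path.append(d); d = nxt[d]`; the Python loop terminates because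
-- every stored value leads to a strictly larger key, so nxt.size + 1 steps always
-- reach the end (proved in the lemmas below); the fuel only makes that explicit.
def walkB (fuel : Nat) (nxt : PySem.Dict Int Int) (d : Int) (path : List Int) :
    List Int × Int :=
  match fuel with
  | 0 => (path, d)
  | fuel + 1 =>
    match nxt.get? d with
    | none => (path, d)
    | some e => walkB fuel nxt e (path ++ [d])

-- B's find: walk to the smallest free day ≥ d, then repoint the whole path to it
def findB (nxt : PySem.Dict Int Int) (d : Int) : Int × PySem.Dict Int Int :=
  let pr := walkB (nxt.size + 1) nxt d []
  (pr.2, pr.1.foldl (fun m p => m.insert p pr.2) nxt)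

-- B's first loop body (state: num, nxt, intervals)
def stepB1 (st : Int × PySem.Dict Int Int × List (Int × Int × Int × Int))
    (fl : Int × Int) : Int × PySem.Dict Int Int × List (Int × Int × Int × Int) :=
  if fl.1 = fl.2 then
    (st.1 + 1, if st.2.1.contains fl.1 then st.2.1 else st.2.1.insert fl.1 (fl.1 + 1), st.2.2)
  else
    (st.1, st.2.1, st.2.2 ++ [(fl.1 - fl.2 + 1, (st.2.2.length : Int), fl.1, fl.2)])

-- B's second loop body
def stepB2 (st : Int × PySem.Dict Int Int) (t : Int × Int × Int × Int) :
    Int × PySem.Dict Int Int :=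
  let dr := findB st.2 t.2.2.1
  if dr.1 ≤ t.2.2.2 then (st.1 + 1, dr.2.insert dr.1 (dr.1 + 1)) else (st.1, dr.2)

def countMeetings_alt (firstDay : List Int) (lastDay : List Int) : Int :=
  let st := (firstDay.zip lastDay).foldl stepB1 (0, PySem.Dict.empty, [])
  -- intervals.sort(): the second tuple component (the index) is distinct across the
  -- list, so sorting by the first two components is the exact lexicographic sort
  let sorted := PySem.List.sorted2 st.2.2 (fun t => t.1) (fun t => t.2.1)
  (sorted.foldl stepB2 (st.1, st.2.1)).1

-- ===== PRECONDITION & SPEC =====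
def Spec_countMeetings (firstDay : List Int) (lastDay : List Int) (out : Int) : Prop := out = countMeetings_alt firstDay lastDay
instance (firstDay : List Int) (lastDay : List Int) (out : Int) : Decidable (Spec_countMeetings firstDay lastDay out) := by unfold Spec_countMeetings; infer_instance

-- ===== CLAIM (what is proved, stated in full; the proofs are below) =====
def Claim_equal_countMeetings : Prop := ∀ (firstDay : List Int) (lastDay : List Int), Dom_countMeetings firstDay lastDay → Spec_countMeetings firstDay lastDay (countMeetings firstDay lastDay)

-- ===== LEMMAS AND PROOFS =====

-- the smallest day ≥ d that is not in the taken set S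
def firstFree (S : List Int) (d : Int) : Int :=
  if d ∈ S then firstFree S (d + 1) else d
termination_by (S.filter (fun x => decide (d ≤ x))).length
decreasing_by
  rename_i h
  have hsub : (S.filter (fun x => decide (d + 1 ≤ x))) = (S.filter (fun x => decide (d ≤ x))).filter (fun x => decide (d + 1 ≤ x)) := by
    rw [List.filter_filter]
    apply List.filter_congr
    intro x _; simp; omega
  rw [hsub]
  apply List.length_filter_lt_length_iff_exists.mpr
  exact ⟨d, by simp [h], by simp⟩

-- invariant tying B's union-find dictionary to A's set of taken days:
-- the keys are exactly the taken days, and every stored edge (k, e) jumps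
-- forward over taken days only
def UFInv (nxt : PySem.Dict Int Int) (S : List Int) : Prop :=
  (∀ k, (nxt.get? k).isSome ↔ k ∈ S) ∧
  (∀ k e, nxt.get? k = some e → k < e ∧ ∀ x, k ≤ x → x < e → x ∈ S)

theorem ff_ge (S : List Int) (d : Int) : d ≤ firstFree S d := by
  fun_induction firstFree with
  | case1 d h ih => omega
  | case2 d h => omega

theorem ff_not_mem (S : List Int) (d : Int) : firstFree S d ∉ S := by
  fun_induction firstFree with
  | case1 d h ih => exact ih
  | case2 d h => exact h

theorem ff_below_mem (S : List Int) (d x : Int) (h1 : d ≤ x) (h2 : x < firstFree S d) :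
    x ∈ S := by
  fun_induction firstFree generalizing x with
  | case1 d h ih =>
    rcases eq_or_lt_of_le h1 with rfl | hlt
    · exact h
    · exact ih x (by omega) h2
  | case2 d h => omega

theorem ff_shift (S : List Int) (d e : Int) (hde : d ≤ e)
    (h : ∀ x, d ≤ x → x < e → x ∈ S) : firstFree S d = firstFree S e := by
  have key : ∀ n : Nat, ∀ d, d ≤ e → (e - d).toNat = n → (∀ x, d ≤ x → x < e → x ∈ S) → firstFree S d = firstFree S e := by
    intro n
    induction n with
    | zero =>
      intro d h1 h2 _
      have : d = e := by omega
      rw [this]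
    | succ n ih =>
      intro d h1 h2 hmem
      have hd : d ∈ S := hmem d le_rfl (by omega)
      rw [firstFree, if_pos hd]
      exact ih (d + 1) (by omega) (by omega) (fun x hx1 hx2 => hmem x (by omega) hx2)
  exact key (e - d).toNat d hde rfl h

theorem scanA_eq_of_le (S : PySem.Set Int) (l i : Int) (h : firstFree S i ≤ l) :
    scanA S l i = firstFree S i := by
  fun_induction scanA with
  | case1 i hc ih =>
    obtain ⟨hmem, hlt⟩ := hc
    rw [firstFree, if_pos ((PySem.Set.contains_iff S i).mp hmem)] at h ⊢
    exact ih h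
  | case2 i hc =>
    rw [Decidable.not_and_iff_not_or_not] at hc
    rcases hc with hc | hc
    · rw [firstFree, if_neg (fun hm => hc ((PySem.Set.contains_iff S i).mpr hm))]
    · have := ff_ge S i; omega

theorem scanA_ge_of_gt (S : PySem.Set Int) (l i : Int) (h : l < firstFree S i) :
    l + 1 ≤ scanA S l i := by
  fun_induction scanA with
  | case1 i hc ih =>
    obtain ⟨hmem, hlt⟩ := hc
    rw [firstFree, if_pos ((PySem.Set.contains_iff S i).mp hmem)] at h
    exact ih h
  | case2 i hc =>
    rw [Decidable.not_and_iff_not_or_not] at hc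
    rcases hc with hc | hc
    · have hm : i ∉ S := fun hm => hc ((PySem.Set.contains_iff S i).mpr hm)
      rw [firstFree, if_neg hm] at h
      omega
    · omega

theorem countP_lt_of {α : Type} (l : List α) (p q : α → Bool) (h : ∀ x ∈ l, p x → q x)
    (a : α) (ha : a ∈ l) (hq : q a = true) (hp : p a = false) :
    l.countP p < l.countP q := by
  induction l with
  | nil => cases ha
  | cons x t ih =>
    rcases List.mem_cons.mp ha with rfl | hat
    · rw [List.countP_cons, List.countP_cons, hp, hq]
      have := List.countP_mono_left (l := t) (p := p) (q := q) (fun x hx => h x (List.mem_cons_of_mem _ hx))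
      simp
      omega
    · rw [List.countP_cons, List.countP_cons]
      have h1 : (if p x then 1 else 0) ≤ (if q x then 1 else 0) := by
        by_cases hx : p x
        · rw [if_pos hx, if_pos (h x (List.mem_cons_self) hx)]
        · simp [hx]
      have := ih (fun y hy => h y (List.mem_cons_of_mem _ hy)) hat
      split_ifs at h1 ⊢ <;> omega

theorem get?_eq_some_mem (nxt : PySem.Dict Int Int) (d e : Int)
    (h : nxt.get? d = some e) : (d, e) ∈ nxt.items := by
  simp only [PySem.Dict.get?, Option.map_eq_some_iff] at h
  obtain ⟨p, hp, hpe⟩ := h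
  have hmem := List.mem_of_find?_eq_some hp
  have hsat := List.find?_some hp
  have h1 : p.1 = d := by simpa using hsat
  have h2 : p = (d, e) := by cases p; simp_all
  rwa [h2] at hmem

theorem walk_spec (nxt : PySem.Dict Int Int) (S : List Int) (hInv : UFInv nxt S)
    (fuel : Nat) (d : Int) (acc : List Int)
    (hfuel : nxt.items.countP (fun q => d ≤ q.1) < fuel) :
    ∃ np, walkB fuel nxt d acc = (acc ++ np, firstFree S d) ∧
      ∀ p ∈ np, (nxt.get? p).isSome ∧ p < firstFree S d ∧
        ∀ x, p ≤ x → x < firstFree S d → x ∈ S := by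
  induction fuel generalizing d acc with
  | zero => omega
  | succ fuel ih =>
    cases hg : nxt.get? d with
    | none =>
      refine ⟨[], ?_, by simp⟩
      have hdS : d ∉ S := by
        intro hm
        have := (hInv.1 d).mpr hm
        rw [hg] at this; simp at this
      simp [walkB, hg, firstFree, hdS]
    | some e =>
      obtain ⟨hde, hseg⟩ := hInv.2 d e hg
      have hdS : d ∈ S := (hInv.1 d).mp (by simp [hg])
      have hffde : firstFree S d = firstFree S e := ff_shift S d e (le_of_lt hde) hseg
      have hmono : nxt.items.countP (fun q => e ≤ q.1) < nxt.items.countP (fun q => d ≤ q.1) := by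
        apply countP_lt_of _ _ _ (fun x _ hx => by simp at hx ⊢; omega) (d, e)
          (get?_eq_some_mem nxt d e hg) (by simp) (by simp; omega)
      obtain ⟨np, hw, hnp⟩ := ih e (acc ++ [d]) (by omega)
      refine ⟨d :: np, ?_, ?_⟩
      · simp only [walkB, hg, hw, hffde, List.append_assoc, List.singleton_append]
      · intro p hp
        rcases List.mem_cons.mp hp with rfl | hpn
        · refine ⟨by simp [hg], ?_, ?_⟩
          · rcases eq_or_lt_of_le (ff_ge S p) with he | h
            · exact absurd (he ▸ hdS) (ff_not_mem S p)
            · exact h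
          · intro x hx1 hx2
            exact ff_below_mem S p x hx1 hx2
        · rw [hffde]; exact hnp p hpn

theorem compress_spec (S : List Int) (r : Int) (path : List Int)
    (nxt : PySem.Dict Int Int) (hInv : UFInv nxt S)
    (hp : ∀ p ∈ path, (nxt.get? p).isSome ∧ p < r ∧ ∀ x, p ≤ x → x < r → x ∈ S) :
    UFInv (path.foldl (fun m p => m.insert p r) nxt) S := by
  induction path generalizing nxt with
  | nil => exact hInv
  | cons p t ih =>
    simp only [List.foldl_cons]
    apply ih
    · obtain ⟨hs, hlt, hseg⟩ := hp p List.mem_cons_self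
      constructor
      · intro k
        rw [PySem.Dict.get?_insert]
        split_ifs with hk
        · subst hk; simpa using (hInv.1 k).mp hs
        · exact hInv.1 k
      · intro k e hke
        rw [PySem.Dict.get?_insert] at hke
        split_ifs at hke with hk
        · cases hke; subst hk; exact ⟨hlt, hseg⟩
        · exact hInv.2 k e hke
    · intro q hq
      obtain ⟨hs, hlt, hseg⟩ := hp q (List.mem_cons_of_mem _ hq)
      refine ⟨?_, hlt, hseg⟩
      rw [PySem.Dict.get?_insert]
      split_ifs with hk
      · simp
      · exact hs

theorem findB_spec (nxt : PySem.Dict Int Int) (S : List Int) (hInv : UFInv nxt S) (d : Int) :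
    (findB nxt d).1 = firstFree S d ∧ UFInv (findB nxt d).2 S := by
  have hfuel : nxt.items.countP (fun q => d ≤ q.1) < nxt.size + 1 :=
    Nat.lt_succ_of_le List.countP_le_length
  obtain ⟨np, hw, hnp⟩ := walk_spec nxt S hInv (nxt.size + 1) d [] hfuel
  refine ⟨by simp [findB, hw], ?_⟩
  have h2 : (findB nxt d).2 = np.foldl (fun m p => m.insert p (firstFree S d)) nxt := by
    simp [findB, hw]
  rw [h2]
  exact compress_spec S (firstFree S d) np nxt hInv hnp

theorem inv_take (nxt : PySem.Dict Int Int) (S : List Int) (hInv : UFInv nxt S)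
    (i : Int) (hi : i ∉ S) : UFInv (nxt.insert i (i + 1)) (S ++ [i]) := by
  constructor
  · intro k
    rw [PySem.Dict.get?_insert]
    split_ifs with hk
    · subst hk; simp
    · rw [hInv.1 k]; simp [hk]
  · intro k e hke
    rw [PySem.Dict.get?_insert] at hke
    split_ifs at hke with hk
    · cases hke; subst hk
      exact ⟨by omega, fun x hx1 hx2 => by simp; omega⟩
    · obtain ⟨h1, h2⟩ := hInv.2 k e hke
      exact ⟨h1, fun x hx1 hx2 => by simp [h2 x hx1 hx2]⟩

theorem insertBy_map {α β : Type} (g : α → β) (before : β → β → Bool) (before' : α → α → Bool)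
    (h : ∀ a b, before (g a) (g b) = before' a b) (x : α) (l : List α) :
    PySem.List.insertBy before (g x) (l.map g) = (PySem.List.insertBy before' x l).map g := by
  induction l with
  | nil => simp [PySem.List.insertBy]
  | cons y ys ih =>
    simp only [List.map_cons, PySem.List.insertBy, h x y]
    split_ifs with hb
    · simp
    · simp [ih]

theorem foldl_insertBy_map {α β : Type} (g : α → β) (before : β → β → Bool) (before' : α → α → Bool)
    (h : ∀ a b, before (g a) (g b) = before' a b) (l : List α) (acc : List α) :
    (l.map g).foldl (fun s x => PySem.List.insertBy before x s) (acc.map g) =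
      (l.foldl (fun s x => PySem.List.insertBy before' x s) acc).map g := by
  induction l generalizing acc with
  | nil => simp
  | cons y ys ih =>
    simp only [List.map_cons, List.foldl_cons]
    rw [insertBy_map g before before' h y acc]
    exact ih _

-- A's lens list is B's intervals list seen through (length, index); sorting commutes
theorem sorted2_map_fst_snd (l : List (Int × Int × Int × Int)) :
    PySem.List.sorted2 (l.map (fun t => (t.1, t.2.1))) (fun p => p.1) (fun p => p.2) false =
      (PySem.List.sorted2 l (fun t => t.1) (fun t => t.2.1) false).map (fun t => (t.1, t.2.1)) := by
  simp only [PySem.List.sorted2]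
  exact foldl_insertBy_map _ _ _ (fun a b => rfl) l []

-- relation between A's and B's states after the first loop
def Rel1 (stA : Int × PySem.Set Int × List (Int × Int) × List (Int × Int))
    (stB : Int × PySem.Dict Int Int × List (Int × Int × Int × Int)) : Prop :=
  stA.1 = stB.1 ∧ UFInv stB.2.1 stA.2.1 ∧
  stA.2.2.2 = stB.2.2.map (fun t => (t.1, t.2.1)) ∧
  stA.2.2.1 = stB.2.2.map (fun t => t.2.2) ∧
  ∀ j : Nat, (hj : j < stB.2.2.length) → stB.2.2[j].2.1 = (j : Int)

theorem rel1_step (stA : Int × PySem.Set Int × List (Int × Int) × List (Int × Int))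
    (stB : Int × PySem.Dict Int Int × List (Int × Int × Int × Int))
    (fl : Int × Int) (h : Rel1 stA stB) : Rel1 (stepA1 stA fl) (stepB1 stB fl) := by
  obtain ⟨hnum, hinv, hlens, hans, hidx⟩ := h
  by_cases hfl : fl.1 = fl.2
  · simp only [stepA1, stepB1, if_pos hfl]
    refine ⟨by simp [hnum], ?_, hlens, hans, hidx⟩
    by_cases hmem : fl.1 ∈ stA.2.1
    · have hc : stB.2.1.contains fl.1 = true := by
        rw [PySem.Dict.contains_eq_isSome_get?]
        exact (hinv.1 _).mpr hmem
      have hadd : PySem.Set.add stA.2.1 fl.1 = stA.2.1 := by simp [PySem.Set.add, hmem]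
      rw [hadd, if_pos hc]
      exact hinv
    · have hc : stB.2.1.contains fl.1 = false := by
        rw [PySem.Dict.contains_eq_isSome_get?]
        simpa using fun hs => hmem ((hinv.1 _).mp hs)
      have hadd : PySem.Set.add stA.2.1 fl.1 = stA.2.1 ++ [fl.1] := by
        simp [PySem.Set.add, hmem]
      rw [hadd, if_neg (by simp [hc])]
      exact inv_take _ _ hinv _ hmem
  · simp only [stepA1, stepB1, if_neg hfl]
    have hlen : stA.2.2.1.length = stB.2.2.length := by rw [hans, List.length_map]
    refine ⟨hnum, hinv, ?_, ?_, ?_⟩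
    · simp only [hlens, List.map_append, List.map_cons, List.map_nil, List.length_append,
        List.length_singleton]
      congr 2
      simp only [Prod.mk.injEq, true_and]
      push_cast [hlen]
      ring
    · simp [hans]
    · intro j hj
      simp only [List.length_append, List.length_singleton] at hj
      rcases Nat.lt_or_ge j stB.2.2.length with hlt | hge
      · rw [List.getElem_append_left hlt]
        exact hidx j hlt
      · have hje : j = stB.2.2.length := by omega
        subst hje
        simp
theorem rel1_fold (z : List (Int × Int))
    (stA : Int × PySem.Set Int × List (Int × Int) × List (Int × Int))
    (stB : Int × PySem.Dict Int Int × List (Int × Int × Int × Int))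
    (h : Rel1 stA stB) : Rel1 (z.foldl stepA1 stA) (z.foldl stepB1 stB) := by
  induction z generalizing stA stB with
  | nil => exact h
  | cons fl t ih => exact ih _ _ (rel1_step stA stB fl h)

-- second loops agree, step by step, through the union-find invariant
theorem phase2 (ans : List (Int × Int)) (L : List (Int × Int × Int × Int)) :
    ∀ (num : Int) (S : PySem.Set Int) (nxt : PySem.Dict Int Int), UFInv nxt S →
      (∀ t ∈ L, PySem.List.pyGetD ans t.2.1 ((0 : Int), (0 : Int)) = t.2.2) →
      ((L.map (fun t => (t.1, t.2.1))).foldl (stepA2 ans) (num, S)).1 =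
        (L.foldl stepB2 (num, nxt)).1 := by
  induction L with
  | nil => intro num S nxt _ _; rfl
  | cons t Ltl ih =>
    intro num S nxt hinv hlook
    rw [List.map_cons, List.foldl_cons, List.foldl_cons]
    have hfb := findB_spec nxt S hinv t.2.2.1
    have hget : PySem.List.pyGetD ans t.2.1 ((0 : Int), (0 : Int)) = t.2.2 :=
      hlook t List.mem_cons_self
    have hlook' : ∀ t' ∈ Ltl, PySem.List.pyGetD ans t'.2.1 ((0 : Int), (0 : Int)) = t'.2.2 :=
      fun t' ht' => hlook t' (List.mem_cons_of_mem _ ht')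
    by_cases hle : firstFree S t.2.2.1 ≤ t.2.2.2
    · have hA : stepA2 ans (num, S) (t.1, t.2.1) =
          (num + 1, PySem.Set.add S (firstFree S t.2.2.1)) := by
        simp only [stepA2, hget, scanA_eq_of_le S t.2.2.2 t.2.2.1 hle]
        rw [if_pos (by omega)]
      have hB : stepB2 (num, nxt) t =
          (num + 1, (findB nxt t.2.2.1).2.insert (firstFree S t.2.2.1) (firstFree S t.2.2.1 + 1)) := by
        simp only [stepB2]
        rw [if_pos (by rw [hfb.1]; exact hle), hfb.1]
      rw [hA, hB]
      have hadd : PySem.Set.add S (firstFree S t.2.2.1) = S ++ [firstFree S t.2.2.1] := by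
        simp [PySem.Set.add, ff_not_mem S t.2.2.1]
      rw [hadd]
      exact ih (num + 1) _ _ (inv_take _ _ hfb.2 _ (ff_not_mem S _)) hlook'
    · have hA : stepA2 ans (num, S) (t.1, t.2.1) = (num, S) := by
        simp only [stepA2, hget]
        rw [if_neg (by have := scanA_ge_of_gt S t.2.2.2 t.2.2.1 (by omega); omega)]
      have hB : stepB2 (num, nxt) t = (num, (findB nxt t.2.2.1).2) := by
        simp only [stepB2]
        rw [if_neg (by rw [hfb.1]; omega)]
      rw [hA, hB]
      exact ih num _ _ hfb.2 hlook'

theorem ufinv_empty : UFInv PySem.Dict.empty [] := by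
  constructor
  · intro k; simp [PySem.Dict.get?, PySem.Dict.empty]
  · intro k e hke; simp [PySem.Dict.get?, PySem.Dict.empty] at hke

theorem countMeetings_spec' (firstDay lastDay : List Int) :
    countMeetings firstDay lastDay = countMeetings_alt firstDay lastDay := by
  unfold countMeetings countMeetings_alt
  have hrel := rel1_fold (firstDay.zip lastDay) (0, PySem.Set.empty, [], [])
    (0, PySem.Dict.empty, []) ⟨rfl, ufinv_empty, rfl, rfl, by simp⟩
  set stA := (firstDay.zip lastDay).foldl stepA1 (0, PySem.Set.empty, [], []) with hstA
  set stB := (firstDay.zip lastDay).foldl stepB1 (0, PySem.Dict.empty, []) with hstB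
  obtain ⟨hnum, hinv, hlens, hans, hidx⟩ := hrel
  have hlook : ∀ t ∈ PySem.List.sorted2 stB.2.2 (fun t => t.1) (fun t => t.2.1) false,
      PySem.List.pyGetD stA.2.2.1 t.2.1 ((0 : Int), (0 : Int)) = t.2.2 := by
    intro t ht
    have htm : t ∈ stB.2.2 :=
      (PySem.List.sorted2_perm stB.2.2 (fun t => t.1) (fun t => t.2.1) false).mem_iff.mp ht
    obtain ⟨j, hj, rfl⟩ := List.mem_iff_getElem.mp htm
    rw [hidx j hj, PySem.List.pyGetD_natCast, hans]
    rw [List.getD_eq_getElem _ _ (by simpa using hj)]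
    simp
  show (List.foldl (stepA2 stA.2.2.1) (stA.1, stA.2.1)
      (PySem.List.sorted2 stA.2.2.2 (fun p => p.1) (fun p => p.2))).1 =
    (List.foldl stepB2 (stB.1, stB.2.1)
      (PySem.List.sorted2 stB.2.2 (fun t => t.1) (fun t => t.2.1))).1
  rw [hlens, sorted2_map_fst_snd, hnum]
  exact phase2 stA.2.2.1 _ stB.1 stA.2.1 stB.2.1 hinv hlook

-- ===== VERDICT (by name: the statement is the Claim_ definition above) =====
theorem countMeetings_spec : Claim_equal_countMeetings := by
  intro firstDay lastDay _
  exact countMeetings_spec' firstDay lastDay
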